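-- pv_equiv track=rewrite | github.com/manwar/perlweeklychallenge-club | challenge-313/lubos-kolouch/python/ch-1.py | is_long_pressed
-- ===== SOURCE A (Python) =====
-- def is_long_pressed(name: str, typed: str) -> bool:
--     """Return True if typed could be produced from name via long-pressing keys."""
--     if len(typed) < len(name):
--         return False
--
--     i = 0
--     j = 0
--     while j < len(typed):
--         if i < len(name) and name[i] == typed[j]:
--             i += 1
--             j += 1
--         elif j > 0 and typed[j] == typed[j - 1]:
--             j += 1
--         else:
--             return False
--     return i == len(name)
-- ===== SOURCE B (Python) =====
-- def _groups(s: str) -> list: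
--     """Run-length encode s as a list of (char, count) pairs."""
--     gs = []
--     i = 0
--     while i < len(s):
--         j = i
--         while j < len(s) and s[j] == s[i]:
--             j += 1
--         gs.append((s[i], j - i))
--         i = j
--     return gs
--
--
-- def is_long_pressed(name: str, typed: str) -> bool:
--     """Return True if typed could be produced from name via long-pressing keys."""
--     gn = _groups(name)
--     gt = _groups(typed)
--     return len(gn) == len(gt) and all(
--         c1 == c2 and k1 <= k2 for (c1, k1), (c2, k2) in zip(gn, gt)
--     )
-- ===== Notes on version B (the rewrite author's own statement) =====
-- stated objective: alternative
-- what changed: Replaces A's two-pointer index walk over the characters by run-length encoding both strings and doing one group-level comparison pass (same character per group, typed run length >= name run length, same number of groups).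
import Mathlib
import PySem

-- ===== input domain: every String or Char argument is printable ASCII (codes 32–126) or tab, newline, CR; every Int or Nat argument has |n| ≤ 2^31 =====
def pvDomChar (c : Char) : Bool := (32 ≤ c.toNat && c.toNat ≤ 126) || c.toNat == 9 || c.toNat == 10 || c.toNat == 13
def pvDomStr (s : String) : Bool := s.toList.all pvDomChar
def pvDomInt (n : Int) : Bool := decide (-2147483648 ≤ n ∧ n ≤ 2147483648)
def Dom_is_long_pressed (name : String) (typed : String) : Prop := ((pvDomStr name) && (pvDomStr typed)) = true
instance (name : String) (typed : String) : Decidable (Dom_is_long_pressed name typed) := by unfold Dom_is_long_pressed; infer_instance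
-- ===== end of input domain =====

-- B replaces A's two-pointer index walk by a run-length-encoding of both strings followed by
-- one group-level comparison pass (objective: alternative decomposition, same cost).

-- ===== PORT A =====
-- the `while j < len(typed)` loop of A, state (i, j)
def pvLoopA (nameL typedL : List Char) (i j : Nat) : Bool :=
  if _h : j < typedL.length then
    if i < nameL.length && nameL[i]? == typedL[j]? then
      pvLoopA nameL typedL (i + 1) (j + 1)
    else if 0 < j && typedL[j]? == typedL[j - 1]? then
      pvLoopA nameL typedL i (j + 1)
    else
      false
  else
    decide (i = nameL.length)
termination_by typedL.length - j

def is_long_pressed (name : String) (typed : String) : Bool :=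
  if typed.toList.length < name.toList.length then false
  else pvLoopA name.toList typed.toList 0 0

-- ===== PORT B =====
-- `_groups` of Source B: run-length encoding (each outer-loop iteration emits one run and jumps past it)
def pvGroups : List Char → List (Char × Nat)
  | [] => []
  | c :: rest =>
    (c, (rest.takeWhile (· == c)).length + 1) :: pvGroups (rest.dropWhile (· == c))
termination_by l => l.length
decreasing_by
  simpa using Nat.lt_succ_of_le (rest.length_dropWhile_le (· == c))

def is_long_pressed_alt (name : String) (typed : String) : Bool :=
  let gn := pvGroups name.toList
  let gt := pvGroups typed.toList
  decide (gn.length = gt.length) &&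
    (gn.zip gt).all (fun p => p.1.1 == p.2.1 && p.1.2 ≤ p.2.2)

-- ===== PRECONDITION & SPEC =====
def Spec_is_long_pressed (name : String) (typed : String) (out : Bool) : Prop := out = is_long_pressed_alt name typed
instance (name : String) (typed : String) (out : Bool) : Decidable (Spec_is_long_pressed name typed out) := by unfold Spec_is_long_pressed; infer_instance

-- ===== CLAIM (what is proved, stated in full; the proofs are below) =====
def Claim_equal_is_long_pressed : Prop := ∀ (name : String) (typed : String), Dom_is_long_pressed name typed → Spec_is_long_pressed name typed (is_long_pressed name typed)

-- ===== LEMMAS AND PROOFS =====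

def pvLa : List Char → List Char → Option Char → Bool
  | ns, [], _ => ns.isEmpty
  | n :: ns, t :: ts, prev =>
    if n = t then pvLa ns ts (some t)
    else if prev = some t then pvLa (n :: ns) ts (some t)
    else false
  | [], t :: ts, prev =>
    if prev = some t then pvLa [] ts (some t) else false
def pvCheck : List (Char × Nat) → List (Char × Nat) → Bool
  | [], [] => true
  | (c, k) :: gs, (d, m) :: hs => c == d && decide (k ≤ m) && pvCheck gs hs
  | _, _ => false
lemma run_decomp (c : Char) (rest : List Char) :
    c :: rest = List.replicate ((rest.takeWhile (· == c)).length + 1) c ++ rest.dropWhile (· == c) := by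
  have hr : rest.takeWhile (· == c) = List.replicate (rest.takeWhile (· == c)).length c := by
    rw [List.eq_replicate_iff]
    exact ⟨rfl, fun b hb => by simpa using List.mem_takeWhile_imp hb⟩
  conv_lhs => rw [← List.takeWhile_append_dropWhile (p := (· == c)) (l := rest)]
  rw [List.replicate_succ, List.cons_append]
  conv_lhs => rw [hr]
lemma head_dropWhile (c : Char) (rest : List Char) :
    (rest.dropWhile (· == c)).head? ≠ some c := by
  intro h
  cases hd : rest.dropWhile (· == c) with
  | nil => simp [hd] at h
  | cons x xs =>
    have := List.head_dropWhile_not (· == c) (l := rest) (by simp [hd])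
    simp [hd] at h this
    exact this h
lemma la_skip (c : Char) (ns ts : List Char) (hn : ns.head? ≠ some c) :
    ∀ m, pvLa ns (List.replicate m c ++ ts) (some c) = pvLa ns ts (some c) := by
  intro m
  induction m with
  | zero => simp
  | succ m ih =>
    rw [List.replicate_succ, List.cons_append]
    cases ns with
    | nil => simpa [pvLa] using ih
    | cons n ns' =>
      have hnc : n ≠ c := by simpa using hn
      simpa [pvLa, hnc] using ih
lemma la_fail (c : Char) (ns ts : List Char) (ht : ts.head? ≠ some c) (k : Nat) :
    pvLa (List.replicate (k+1) c ++ ns) ts (some c) = false := by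
  cases ts with
  | nil => simp [pvLa, List.replicate_succ]
  | cons t ts' =>
    have hct : c ≠ t := fun h => ht (by simp [h])
    rw [List.replicate_succ, List.cons_append, pvLa]
    simp [hct]

lemma la_run (c : Char) (ns ts : List Char) (hn : ns.head? ≠ some c) (ht : ts.head? ≠ some c) :
    ∀ k m prev, pvLa (List.replicate (k+1) c ++ ns) (List.replicate (m+1) c ++ ts) prev
      = if k ≤ m then pvLa ns ts (some c) else false := by
  intro k
  induction k with
  | zero =>
    intro m prev
    rw [List.replicate_succ (n := m), List.replicate_succ, List.cons_append, List.cons_append]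
    simp only [Nat.zero_le, if_true]
    show pvLa (c :: ns) (c :: (List.replicate m c ++ ts)) prev = _
    rw [pvLa, if_pos rfl]
    exact la_skip c ns ts hn m
  | succ k ih =>
    intro m prev
    cases m with
    | zero =>
      rw [List.replicate_succ (n := k+1), List.cons_append, List.replicate_one,
        List.singleton_append, pvLa]
      rw [if_pos rfl, if_neg (Nat.not_succ_le_zero k)]
      exact la_fail c ns ts ht k
    | succ m =>
      rw [List.replicate_succ (n := k+1), List.replicate_succ (n := m+1),
        List.cons_append, List.cons_append, pvLa]
      rw [if_pos rfl, ih m (some c)]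
      simp

lemma la_eq_check : ∀ (typedL nameL : List Char) (prev : Option Char),
    (∀ d, typedL.head? = some d → prev ≠ some d) →
    pvLa nameL typedL prev = pvCheck (pvGroups nameL) (pvGroups typedL) := by
  intro typedL
  induction typedL using pvGroups.induct with
  | case1 =>
    intro nameL prev _
    cases nameL with
    | nil => simp [pvLa, pvGroups, pvCheck]
    | cons n ns =>
      have h1 : pvLa (n::ns) [] prev = false := rfl
      have h2 : pvCheck (pvGroups (n::ns)) (pvGroups []) = false := by
        simp only [pvGroups]; rfl
      rw [h1, h2]
  | case2 d rest ih =>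
    intro nameL prev hprev
    have hpd : prev ≠ some d := hprev d (by simp)
    cases nameL with
    | nil =>
      rw [pvLa, pvGroups, pvGroups]
      simp [pvCheck, hpd]
    | cons c nrest =>
      by_cases hcd : c = d
      · subst hcd
        -- decompose both sides into their first runs
        rw [pvGroups, pvGroups]
        conv_lhs =>
          rw [run_decomp c nrest, run_decomp c rest]
        rw [la_run c _ _ (head_dropWhile c nrest) (head_dropWhile c rest)]
        rw [pvCheck]
        by_cases hk : (nrest.takeWhile (· == c)).length ≤ (rest.takeWhile (· == c)).length
        · rw [if_pos hk]
          rw [ih (nrest.dropWhile (· == c)) (some c)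
            (fun e he hce => head_dropWhile c rest (by rw [he, ← Option.some.inj hce]))]
          simp [hk]
        · rw [if_neg hk]
          simp [hk]
      · rw [pvLa, pvGroups, pvGroups, pvCheck]
        have : prev ≠ some d := hpd
        simp [hcd, this]

lemma loopA_eq_la (nameL typedL : List Char) (i j : Nat) :
    j ≤ typedL.length → i ≤ nameL.length →
      pvLoopA nameL typedL i j
        = pvLa (nameL.drop i) (typedL.drop j) (if j = 0 then none else typedL[j-1]?) := by
  induction i, j using pvLoopA.induct (nameL := nameL) (typedL := typedL) with
  | case1 i j h hc ih =>
    intro hj hi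
    simp only [Bool.and_eq_true, decide_eq_true_eq, beq_iff_eq] at hc
    obtain ⟨hilt, heq⟩ := hc
    have hni : nameL[i]? = some nameL[i] := List.getElem?_eq_getElem hilt
    have htj : typedL[j]? = some typedL[j] := List.getElem?_eq_getElem h
    have hch : nameL[i] = typedL[j] := by
      rw [hni, htj] at heq; exact Option.some.inj heq
    have hLHS : pvLoopA nameL typedL i j
        = pvLa (List.drop (i+1) nameL) (List.drop (j+1) typedL) (some typedL[j]) := by
      rw [pvLoopA, dif_pos h, if_pos (by simp [hilt, htj, hch])]
      rw [ih (by omega) (by omega), if_neg (show ¬ (j + 1 = 0) by omega)]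
      simp only [Nat.add_sub_cancel, htj]
    rw [hLHS, List.drop_eq_getElem_cons hilt, List.drop_eq_getElem_cons h, pvLa, if_pos hch]
  | case2 i j h hc1 hc2 ih =>
    intro hj hi
    simp only [Bool.and_eq_true, decide_eq_true_eq, beq_iff_eq] at hc1 hc2
    obtain ⟨hj0, heq⟩ := hc2
    have htj : typedL[j]? = some typedL[j] := List.getElem?_eq_getElem h
    have hj1 : j - 1 < typedL.length := by omega
    have htj1 : typedL[j-1]? = some typedL[j-1] := List.getElem?_eq_getElem hj1
    have hsame : typedL[j] = typedL[j-1] := by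
      rw [htj, htj1] at heq; exact Option.some.inj heq
    have hLHS : pvLoopA nameL typedL i j
        = pvLa (List.drop i nameL) (List.drop (j+1) typedL) (some typedL[j]) := by
      rw [pvLoopA, dif_pos h, if_neg (by simpa using hc1), if_pos (by simp [hj0, heq])]
      rw [ih (by omega) hi, if_neg (show ¬ (j + 1 = 0) by omega)]
      simp only [Nat.add_sub_cancel, htj]
    rw [hLHS, List.drop_eq_getElem_cons h, if_neg (show ¬ j = 0 by omega), htj1]
    by_cases hil : i < nameL.length
    · rw [List.drop_eq_getElem_cons hil, pvLa]
      have hne : nameL[i] ≠ typedL[j] := by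
        intro hcc
        exact hc1 ⟨hil, by rw [List.getElem?_eq_getElem hil, htj, hcc]⟩
      rw [if_neg hne, if_pos (by rw [← hsame]), ← List.drop_eq_getElem_cons hil]
    · have hdrop : List.drop i nameL = [] := List.drop_eq_nil_of_le (by omega)
      rw [hdrop, pvLa, if_pos (by rw [← hsame])]
  | case3 i j h hc1 hc2 =>
    intro hj hi
    simp only [Bool.and_eq_true, decide_eq_true_eq, beq_iff_eq] at hc1 hc2
    have htj : typedL[j]? = some typedL[j] := List.getElem?_eq_getElem h
    have hLHS : pvLoopA nameL typedL i j = false := by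
      rw [pvLoopA, dif_pos h, if_neg (by simpa using hc1), if_neg (by simpa using hc2)]
    rw [hLHS, List.drop_eq_getElem_cons h]
    have hprev : (if j = 0 then none else typedL[j-1]?) ≠ some typedL[j] := by
      by_cases hj0 : j = 0
      · simp [hj0]
      · rw [if_neg hj0]
        intro hcc
        exact hc2 ⟨by omega, by rw [htj, hcc]⟩
    by_cases hil : i < nameL.length
    · rw [List.drop_eq_getElem_cons hil, pvLa]
      have hne : nameL[i] ≠ typedL[j] := by
        intro hcc
        exact hc1 ⟨hil, by rw [List.getElem?_eq_getElem hil, htj, hcc]⟩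
      rw [if_neg hne, if_neg hprev]
    · have hdrop : List.drop i nameL = [] := List.drop_eq_nil_of_le (by omega)
      rw [hdrop, pvLa, if_neg hprev]
  | case4 i j h =>
    intro hj hi
    have hdt : List.drop j typedL = [] := List.drop_eq_nil_of_le (by omega)
    rw [pvLoopA, dif_neg h, hdt]
    have hla : pvLa (List.drop i nameL) [] (if j = 0 then none else typedL[j-1]?)
        = (List.drop i nameL).isEmpty := rfl
    rw [hla]
    by_cases hie : i = nameL.length
    · simp [hie, List.drop_eq_nil_of_le (le_refl nameL.length)]
    · have hilt : i < nameL.length := by omega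
      rw [List.drop_eq_getElem_cons hilt]
      simpa [hie] using hilt

lemma check_eq_zip : ∀ (gs hs : List (Char × Nat)),
    (decide (gs.length = hs.length) &&
      (gs.zip hs).all (fun p => p.1.1 == p.2.1 && p.1.2 ≤ p.2.2)) = pvCheck gs hs := by
  intro gs
  induction gs with
  | nil => intro hs; cases hs <;> simp [pvCheck]
  | cons g gs ih =>
    intro hs
    cases hs with
    | nil => simp [pvCheck]
    | cons h hs =>
      obtain ⟨c, k⟩ := g; obtain ⟨d, m⟩ := h
      simp only [pvCheck, List.zip_cons_cons, List.all_cons, List.length_cons,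
        Nat.add_right_cancel_iff, ← ih hs]
      by_cases h1 : gs.length = hs.length <;> by_cases h2 : c = d <;>
        by_cases h3 : k ≤ m <;> simp [h1, h2, h3]

lemma check_sum : ∀ gs hs, pvCheck gs hs = true →
    (List.map Prod.snd gs).sum ≤ (List.map Prod.snd hs).sum := by
  intro gs
  induction gs with
  | nil => intro hs _; simp
  | cons g gs ih =>
    intro hs hc
    cases hs with
    | nil => obtain ⟨c, k⟩ := g; simp [pvCheck] at hc
    | cons h hs =>
      obtain ⟨c, k⟩ := g; obtain ⟨d, m⟩ := h
      simp only [pvCheck, Bool.and_eq_true, decide_eq_true_eq] at hc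
      have := ih hs hc.2
      simp only [List.map_cons, List.sum_cons]
      omega

lemma groups_sum (l : List Char) : ((pvGroups l).map Prod.snd).sum = l.length := by
  induction l using pvGroups.induct with
  | case1 => simp [pvGroups]
  | case2 c rest ih =>
    rw [pvGroups]
    simp only [List.map_cons, List.sum_cons, ih]
    have := congrArg List.length (List.takeWhile_append_dropWhile (p := (· == c)) (l := rest))
    simp only [List.length_append] at this
    simp only [List.length_cons]
    omega

-- ===== VERDICT (by name: the statement is the Claim_ definition above) =====
theorem is_long_pressed_spec : Claim_equal_is_long_pressed := by
  intro name typed _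
  unfold Spec_is_long_pressed is_long_pressed is_long_pressed_alt
  rw [check_eq_zip]
  by_cases hlen : typed.toList.length < name.toList.length
  · rw [if_pos hlen]
    cases hc : pvCheck (pvGroups name.toList) (pvGroups typed.toList) with
    | false => rfl
    | true =>
      have := check_sum _ _ hc
      rw [groups_sum, groups_sum] at this
      omega
  · rw [if_neg hlen]
    rw [loopA_eq_la name.toList typed.toList 0 0 (Nat.zero_le _) (Nat.zero_le _)]
    simpa using la_eq_check typed.toList name.toList none (by simp)
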